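-- pv_equiv track=rewrite | github.com/coltbk/websockets | car_files/just_drive.py | clamp
-- ===== SOURCE A (Python) =====
-- def clamp(n, min, max):
--     if min > max:
--         return clamp(n, max, min)
--
--     if n < min:
--         return min
--     if n > max:
--         return max
--     return n
-- ===== SOURCE B (Python) =====
-- def clamp(n, min, max):
--     return sorted((n, min, max))[1]
-- ===== Notes on version B (the rewrite author's own statement) =====
-- stated objective: simpler
-- what changed: Replaces the swap-recursion plus three-way branch chain with a single branch-free expression: clamp(n,min,max) is the median of the three values, computed as sorted((n, min, max))[1]; the median is invariant under swapping the bounds, so the recursive swap disappears.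
import Mathlib
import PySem

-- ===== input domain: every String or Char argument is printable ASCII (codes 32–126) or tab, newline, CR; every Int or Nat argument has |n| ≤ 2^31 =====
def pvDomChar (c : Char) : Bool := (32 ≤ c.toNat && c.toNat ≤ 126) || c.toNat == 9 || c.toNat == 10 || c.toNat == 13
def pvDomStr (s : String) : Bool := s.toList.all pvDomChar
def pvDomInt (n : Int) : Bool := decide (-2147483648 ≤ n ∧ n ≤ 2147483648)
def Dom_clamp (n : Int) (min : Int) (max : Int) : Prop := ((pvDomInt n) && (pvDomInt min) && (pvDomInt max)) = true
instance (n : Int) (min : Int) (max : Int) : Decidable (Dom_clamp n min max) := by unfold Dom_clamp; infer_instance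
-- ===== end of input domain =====

-- ===== PORT A =====
-- literal port of A: one swap-recursion when min > max, then the branch chain
def clamp (n : Int) (min : Int) (max : Int) : Int :=
  if min > max then clamp n max min
  else if n < min then min
  else if n > max then max
  else n
termination_by (if max < min then 1 else 0)
decreasing_by simp_all; omega

-- ===== PORT B =====
-- B: sorted((n, min, max))[1] — the median of the three values; index 1 is always in range
def clamp_alt (n : Int) (min : Int) (max : Int) : Int :=
  (PySem.List.pyGet? (PySem.List.sorted [n, min, max] (fun x => x) false) 1).getD 0

-- ===== PRECONDITION & SPEC =====
def Spec_clamp (n : Int) (min : Int) (max : Int) (out : Int) : Prop := out = clamp_alt n min max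
instance (n : Int) (min : Int) (max : Int) (out : Int) : Decidable (Spec_clamp n min max out) := by unfold Spec_clamp; infer_instance

-- ===== CLAIM (what is proved, stated in full; the proofs are below) =====
def Claim_equal_clamp : Prop := ∀ (n : Int) (min : Int) (max : Int), Dom_clamp n min max → Spec_clamp n min max (clamp n min max)

-- ===== LEMMAS AND PROOFS =====

-- median of three, written out: case analysis shows the sorted triple explicitly
theorem sorted_triple_mid (n a b : Int) (h : a ≤ b) :
    (PySem.List.pyGet? (PySem.List.sorted [n, a, b] (fun x => x) false) 1).getD 0 =
      if n < a then a else if n > b then b else n := by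
  rcases lt_trichotomy n a with h1 | h1 | h1
  · rw [PySem.List.sorted_id_eq_of_perm_of_pairwise (ys := [n, a, b])]
    · simp [PySem.List.pyGet?, PySem.List.pyIdx?]; omega
    · exact List.Perm.refl _
    · simp; omega
  · rw [PySem.List.sorted_id_eq_of_perm_of_pairwise (ys := [a, n, b])]
    · simp [PySem.List.pyGet?, PySem.List.pyIdx?]; omega
    · exact List.Perm.swap _ _ _
    · simp; omega
  · by_cases h2 : n > b
    · rw [PySem.List.sorted_id_eq_of_perm_of_pairwise (ys := [a, b, n])]
      · simp [PySem.List.pyGet?, PySem.List.pyIdx?]; omega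
      · exact (List.perm_iff_count.mpr (by intro x; simp [List.count_cons]; omega))
      · simp; omega
    · rw [PySem.List.sorted_id_eq_of_perm_of_pairwise (ys := [a, n, b])]
      · simp [PySem.List.pyGet?, PySem.List.pyIdx?]; omega
      · exact List.Perm.swap _ _ _
      · simp; omega

-- ===== VERDICT (by name: the statement is the Claim_ definition above) =====
theorem clamp_spec : Claim_equal_clamp := by
  intro n min max _
  unfold Spec_clamp clamp_alt
  rw [clamp]
  by_cases h : min > max
  · rw [if_pos h, clamp, if_neg (by omega)]
    rw [PySem.List.sorted_eq_sorted_of_perm [n, min, max] [n, max, min] (fun x => x)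
      (fun _ _ hab => hab) (List.Perm.cons n (List.Perm.swap _ _ _))]
    rw [sorted_triple_mid n max min (by omega)]
  · rw [if_neg h, sorted_triple_mid n min max (by omega)]
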